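-- pv_equiv track=rewrite | github.com/VicsonPeng/hw3_game_store | player/downloads/2/tetris_game/tetris_game/client_gui.py | parse_rle
-- ===== SOURCE A (Python) =====
-- def parse_rle(rle):
--     vals = []
--     if not rle:
--         return [[0]*10 for _ in range(20)]
--     for chunk in rle.split(';'):
--         try:
--             v, c = chunk.split(':')
--             v, c = int(v), int(c)
--             vals.extend([v]*c)
--         except Exception:
--             pass
--     if len(vals) < 200:
--         vals += [0]*(200-len(vals))
--     board = []
--     k = 0
--     for y in range(20):
--         row = []
--         for x in range(10):
--             row.append(vals[k]); k+=1
--         board.append(row)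
--     return board
-- ===== SOURCE B (Python) =====
-- def parse_rle(rle):
--     board = [[0] * 10 for _ in range(20)]
--     if not rle:
--         return board
--     pos = 0
--     for chunk in rle.split(';'):
--         try:
--             v, c = chunk.split(':')
--             v, c = int(v), int(c)
--         except Exception:
--             continue
--         for _ in range(c):
--             if pos >= 200:
--                 return board
--             board[pos // 10][pos % 10] = v
--             pos += 1
--     return board
-- ===== Notes on version B (the rewrite author's own statement) =====
-- stated objective: alternative
-- what changed: B decodes each run directly into a preallocated 20x10 grid with a single position counter and stops as soon as 200 cells are filled, instead of materializing the whole run-length expansion into a flat list, padding it, and reshaping it with a second nested-loop pass.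
import Mathlib
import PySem

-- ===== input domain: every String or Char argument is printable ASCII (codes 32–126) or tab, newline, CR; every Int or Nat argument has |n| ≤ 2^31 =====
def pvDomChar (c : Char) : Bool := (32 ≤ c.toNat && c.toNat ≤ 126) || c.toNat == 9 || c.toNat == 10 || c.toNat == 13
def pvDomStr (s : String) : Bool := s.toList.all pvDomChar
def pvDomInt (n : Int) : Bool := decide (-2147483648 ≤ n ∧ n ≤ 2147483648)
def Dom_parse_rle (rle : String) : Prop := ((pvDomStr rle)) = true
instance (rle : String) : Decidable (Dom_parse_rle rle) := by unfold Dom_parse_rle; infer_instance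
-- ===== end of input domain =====

-- B decodes each run directly into a preallocated 20x10 grid with a position counter and
-- stops once 200 cells are filled, instead of expanding everything into a flat list,
-- padding it and reshaping it in a second pass.

-- shared helper: the try-block both Pythons contain verbatim
-- (v, c = chunk.split(':'); v, c = int(v), int(c)); none = the exception path
def pvParseChunk (chunk : String) : Option (Int × Int) :=
  match (PySem.Str.split? chunk ":").getD [] with  -- exact: sep ":" ≠ ""
  | [v, c] =>
    match PySem.Int.ofStr? v, PySem.Int.ofStr? c with
    | some vi, some ci => some (vi, ci)
    | _, _ => none
  | _ => none

-- ===== PORT A =====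
def parse_rle (rle : String) : List (List Int) :=
  if rle = "" then (List.range 20).map (fun _ => List.replicate 10 (0 : Int))
  else
    let vals := ((PySem.Str.split? rle ";").getD []).foldl (fun vals chunk =>
      match pvParseChunk chunk with
      | some (v, c) => vals ++ List.replicate c.toNat v   -- vals.extend([v]*c); [v]*c is empty for c ≤ 0
      | none => vals) []
    let vals := if vals.length < 200 then vals ++ List.replicate (200 - vals.length) (0 : Int) else vals
    -- nested board-building loop; vals[k] is exact here since 0 ≤ k < 200 ≤ len(vals)
    let fin := (PySem.List.pyRange 0 20 1).foldl (fun (bk : List (List Int) × Int) (_ : Int) =>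
      let rk := (PySem.List.pyRange 0 10 1).foldl (fun (rk : List Int × Int) (_ : Int) =>
        (rk.1 ++ [(PySem.List.pyGet? vals rk.2).getD 0], rk.2 + 1)) (([] : List Int), bk.2)
      (bk.1 ++ [rk.1], rk.2)) (([] : List (List Int)), (0 : Int))
    fin.1

-- ===== PORT B =====
-- board[pos // 10][pos % 10] = v ; exact: B only calls this with 0 ≤ pos < 200
def pvAltWrite (board : List (List Int)) (pos : Int) (v : Int) : List (List Int) :=
  let r := (PySem.Int.floordiv pos 10).toNat
  board.set r ((board.getD r []).set (PySem.Int.mod pos 10).toNat v)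

-- for _ in range(c): if pos >= 200: return board; write; pos += 1
-- the Bool signals the early `return board`
def pvAltInner : Nat → List (List Int) → Int → Int → List (List Int) × Int × Bool
  | 0, board, pos, _ => (board, pos, false)
  | n + 1, board, pos, v =>
    if pos ≥ 200 then (board, pos, true)
    else pvAltInner n (pvAltWrite board pos v) (pos + 1) v

def pvAltLoop : List String → List (List Int) → Int → List (List Int)
  | [], board, _ => board
  | chunk :: rest, board, pos =>
    match pvParseChunk chunk with
    | none => pvAltLoop rest board pos
    | some (v, c) =>
      match pvAltInner c.toNat board pos v with
      | (board', pos', stop) => if stop then board' else pvAltLoop rest board' pos'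

def parse_rle_alt (rle : String) : List (List Int) :=
  let board := (List.range 20).map (fun _ => List.replicate 10 (0 : Int))
  if rle = "" then board
  else pvAltLoop ((PySem.Str.split? rle ";").getD []) board 0

-- ===== PRECONDITION & SPEC =====
def Spec_parse_rle (rle : String) (out : List (List Int)) : Prop := out = parse_rle_alt rle
instance (rle : String) (out : List (List Int)) : Decidable (Spec_parse_rle rle out) := by unfold Spec_parse_rle; infer_instance

-- ===== CLAIM (what is proved, stated in full; the proofs are below) =====
def Claim_equal_parse_rle : Prop := ∀ (rle : String), Dom_parse_rle rle → Spec_parse_rle rle (parse_rle rle)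

-- ===== LEMMAS AND PROOFS =====

-- the run of values one chunk contributes
def pvChunkVals (chunk : String) : List Int :=
  match pvParseChunk chunk with
  | some (v, c) => List.replicate c.toNat v
  | none => []

-- the board determined by a flat list of values (0 beyond the end)
def pvBoardOf (l : List Int) : List (List Int) :=
  (List.range 20).map (fun y => (List.range 10).map (fun x => l.getD (10 * y + x) 0))

theorem pvGetD_append_ne (ws : List Int) (v : Int) (i : Nat) (h : i ≠ ws.length) :
    (ws ++ [v]).getD i 0 = ws.getD i 0 := by
  rcases Nat.lt_or_ge i ws.length with hl | hg
  · simp [List.getD_eq_getElem?_getD, List.getElem?_append_left hl]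
  · have h2 : ws.length < i := lt_of_le_of_ne hg (Ne.symm h)
    have h3 : ¬ i ≤ ws.length := by omega
    simp [List.getD_eq_getElem?_getD, List.getElem?_append_right hg, h3, List.getElem?_eq_none hg]

theorem pvGetD_pad (l : List Int) (i : Nat) :
    (l ++ List.replicate (200 - l.length) (0 : Int)).getD i 0 = l.getD i 0 := by
  rcases Nat.lt_or_ge i l.length with hl | hg
  · simp [List.getD_eq_getElem?_getD, List.getElem?_append_left hl]
  · simp [List.getD_eq_getElem?_getD, List.getElem?_append_right hg,
      List.getElem?_replicate, List.getElem?_eq_none hg]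
    split <;> simp

theorem pvGetD_take200 (l : List Int) (i : Nat) (h : i < 200) :
    (List.take 200 l).getD i 0 = l.getD i 0 := by
  simp [List.getD_eq_getElem?_getD, h]

theorem pvBoardOf_congr (l l' : List Int) (h : ∀ i, i < 200 → l.getD i 0 = l'.getD i 0) :
    pvBoardOf l = pvBoardOf l' := by
  unfold pvBoardOf
  apply List.map_congr_left
  intro y hy
  apply List.map_congr_left
  intro x hx
  simp only [List.mem_range] at hy hx
  exact h _ (by omega)

theorem pvInnerFold (L : List Int) (vals acc : List Int) (k : Nat) :
    L.foldl (fun (rk : List Int × Int) (_ : Int) =>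
        (rk.1 ++ [(PySem.List.pyGet? vals rk.2).getD 0], rk.2 + 1)) (acc, (k : Int))
    = (acc ++ (List.range L.length).map (fun i => vals.getD (k + i) 0), ((k + L.length : Nat) : Int)) := by
  induction L generalizing acc k with
  | nil => simp
  | cons a L ih =>
    simp only [List.foldl_cons]
    have hcast : ((k : Int) + 1) = ((k + 1 : Nat) : Int) := by push_cast; ring
    have hget : (PySem.List.pyGet? vals (k : Int)).getD 0 = vals.getD k 0 := by
      simp [PySem.List.pyGet?_natCast, List.getD_eq_getElem?_getD]
    rw [hcast, ih, hget]
    have hmaps : (List.range L.length).map (fun i => vals.getD (k + 1 + i) 0)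
        = (List.range L.length).map (fun i => vals.getD (k + (i + 1)) 0) :=
      List.map_congr_left (fun i _ => by rw [show k + 1 + i = k + (i + 1) from by omega])
    have hrange : (List.range (L.length + 1)).map (fun i => vals.getD (k + i) 0)
        = vals.getD (k + 0) 0 :: (List.range L.length).map (fun i => vals.getD (k + (i + 1)) 0) := by
      rw [List.range_succ_eq_map (n := L.length), List.map_cons, List.map_map]
      rfl
    apply Prod.ext
    · show acc ++ [vals.getD k 0] ++ _ = _
      rw [hmaps, List.length_cons, hrange, List.append_assoc, List.singleton_append, Nat.add_zero]
    · show ((k + 1 + L.length : Nat) : Int) = ((k + (a :: L).length : Nat) : Int)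
      push_cast
      simp
      omega

theorem pvOuterFold (L : List Int) (vals : List Int) (acc : List (List Int)) (k : Nat) :
    L.foldl (fun (bk : List (List Int) × Int) (_ : Int) =>
      let rk := (PySem.List.pyRange 0 10 1).foldl (fun (rk : List Int × Int) (_ : Int) =>
        (rk.1 ++ [(PySem.List.pyGet? vals rk.2).getD 0], rk.2 + 1)) (([] : List Int), bk.2)
      (bk.1 ++ [rk.1], rk.2)) (acc, (k : Int))
    = (acc ++ (List.range L.length).map (fun y =>
        (List.range 10).map (fun x => vals.getD (k + 10 * y + x) 0)), ((k + 10 * L.length : Nat) : Int)) := by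
  induction L generalizing acc k with
  | nil => simp
  | cons a L ih =>
    simp only [List.foldl_cons]
    have hlen : (PySem.List.pyRange 0 10 1).length = 10 := by decide
    rw [pvInnerFold (PySem.List.pyRange 0 10 1) vals [] k, hlen]
    simp only [List.nil_append]
    rw [ih]
    have hmaps : (List.range L.length).map (fun y => (List.range 10).map (fun x => vals.getD (k + 10 + 10 * y + x) 0))
        = (List.range L.length).map (fun y => (List.range 10).map (fun x => vals.getD (k + 10 * (y + 1) + x) 0)) :=
      List.map_congr_left (fun y _ => by rw [show k + 10 + 10 * y = k + 10 * (y + 1) from by omega])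
    have hrow : (List.range 10).map (fun i => vals.getD (k + i) 0)
        = (List.range 10).map (fun x => vals.getD (k + 10 * 0 + x) 0) := by
      simp
    have hrange : (List.range (L.length + 1)).map (fun y => (List.range 10).map (fun x => vals.getD (k + 10 * y + x) 0))
        = (List.range 10).map (fun x => vals.getD (k + 10 * 0 + x) 0)
          :: (List.range L.length).map (fun y => (List.range 10).map (fun x => vals.getD (k + 10 * (y + 1) + x) 0)) := by
      rw [List.range_succ_eq_map (n := L.length), List.map_cons, List.map_map]
      rfl
    apply Prod.ext
    · show acc ++ [(List.range 10).map (fun i => vals.getD (k + i) 0)] ++ _ = _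
      rw [hrow, hmaps, List.length_cons, hrange, List.append_assoc, List.singleton_append]
    · show ((k + 10 + 10 * L.length : Nat) : Int) = ((k + 10 * (a :: L).length : Nat) : Int)
      push_cast
      simp
      omega

theorem pvReshape (vals : List Int) :
    ((PySem.List.pyRange 0 20 1).foldl (fun (bk : List (List Int) × Int) (_ : Int) =>
      let rk := (PySem.List.pyRange 0 10 1).foldl (fun (rk : List Int × Int) (_ : Int) =>
        (rk.1 ++ [(PySem.List.pyGet? vals rk.2).getD 0], rk.2 + 1)) (([] : List Int), bk.2)
      (bk.1 ++ [rk.1], rk.2)) (([] : List (List Int)), (0 : Int))).1 = pvBoardOf vals := by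
  rw [show ((([] : List (List Int)), (0 : Int))) = ((([] : List (List Int)), ((0 : Nat) : Int))) from by norm_num,
    pvOuterFold]
  have hlen : (PySem.List.pyRange 0 20 1).length = 20 := by decide
  rw [hlen]
  simp [pvBoardOf]

theorem pvA_eq (rle : String) (h : rle ≠ "") :
    parse_rle rle = pvBoardOf (((PySem.Str.split? rle ";").getD []).flatMap pvChunkVals) := by
  unfold parse_rle
  rw [if_neg h]
  have hf : (fun (vals : List Int) chunk => match pvParseChunk chunk with
      | some (v, c) => vals ++ List.replicate c.toNat v
      | none => vals)
      = fun (vals : List Int) chunk => vals ++ pvChunkVals chunk := by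
    funext vals chunk
    unfold pvChunkVals
    cases hp : pvParseChunk chunk with
    | none => simp
    | some p => cases p; simp
  rw [hf, PySem.List.foldl_append_eq_flatMap]
  set flat := ((PySem.Str.split? rle ";").getD []).flatMap pvChunkVals with hflat
  simp only [List.nil_append]
  rw [pvReshape]
  by_cases hlt : flat.length < 200
  · rw [if_pos hlt]
    exact pvBoardOf_congr _ _ (fun i _ => pvGetD_pad flat i)
  · rw [if_neg hlt]

theorem pvWrite_eq (ws : List Int) (v : Int) (h : ws.length < 200) :
    pvAltWrite (pvBoardOf ws) (ws.length : Int) v = pvBoardOf (ws ++ [v]) := by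
  have hfd : PySem.Int.floordiv (ws.length : Int) 10 = ((ws.length / 10 : Nat) : Int) := by
    exact_mod_cast PySem.Int.floordiv_natCast ws.length 10
  have hmd : PySem.Int.mod (ws.length : Int) 10 = ((ws.length % 10 : Nat) : Int) := by
    exact_mod_cast PySem.Int.mod_natCast ws.length 10
  set L := ws.length with hL
  have hdiv : L / 10 < 20 := by omega
  have hgetrow : (pvBoardOf ws).getD (L / 10) [] = (List.range 10).map (fun x => ws.getD (10 * (L / 10) + x) 0) := by
    simp [pvBoardOf, List.getD_eq_getElem?_getD, List.getElem?_map, List.getElem?_range hdiv]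
  unfold pvAltWrite
  rw [hfd, hmd, Int.toNat_natCast, Int.toNat_natCast]
  show (pvBoardOf ws).set (L / 10) (((pvBoardOf ws).getD (L / 10) []).set (L % 10) v) = pvBoardOf (ws ++ [v])
  rw [hgetrow]
  unfold pvBoardOf
  apply List.ext_getElem
  · simp
  intro y hy1 hy2
  simp only [List.length_set, List.length_map, List.length_range] at hy1 hy2
  simp only [List.getElem_set, List.getElem_map, List.getElem_range]
  by_cases hyd : L / 10 = y
  · rw [if_pos hyd]
    apply List.ext_getElem
    · simp
    intro x hx1 hx2
    simp only [List.length_set, List.length_map, List.length_range] at hx1 hx2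
    simp only [List.getElem_set, List.getElem_map, List.getElem_range]
    by_cases hxm : L % 10 = x
    · rw [if_pos hxm]
      have hidx : 10 * y + x = L := by omega
      rw [hidx]
      simp [List.getD_eq_getElem?_getD, hL]
    · rw [if_neg hxm]
      have hsh : 10 * (L / 10) + x = 10 * y + x := by rw [hyd]
      rw [hsh]
      exact (pvGetD_append_ne ws v _ (by omega)).symm
  · rw [if_neg hyd]
    apply List.map_congr_left
    intro x hx
    simp only [List.mem_range] at hx
    exact (pvGetD_append_ne ws v _ (by omega)).symm

theorem pvInner_eq (n : Nat) (ws : List Int) (v : Int) (h : ws.length ≤ 200) :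
    pvAltInner n (pvBoardOf ws) (ws.length : Int) v
    = (pvBoardOf (ws ++ List.replicate (min n (200 - ws.length)) v),
       ((ws.length + min n (200 - ws.length) : Nat) : Int),
       decide (200 < ws.length + n)) := by
  induction n generalizing ws with
  | zero =>
    have hn : ¬ (200 < ws.length + 0) := by omega
    simp [pvAltInner, hn]
    exact h
  | succ n ih =>
    by_cases hL : ws.length < 200
    · have hcond : ¬ ((ws.length : Int) ≥ 200) := by exact_mod_cast (by omega : ¬ (200 ≤ ws.length))
      rw [pvAltInner, if_neg hcond, pvWrite_eq ws v hL,
        show ((ws.length : Int) + 1) = (((ws ++ [v]).length : Nat) : Int) from by simp,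
        ih (ws ++ [v]) (by simp only [List.length_append, List.length_cons, List.length_nil]; omega)]
      simp only [List.length_append, List.length_cons, List.length_nil, Nat.zero_add]
      have harith : ws.length + 1 + n = ws.length + (n + 1) := by omega
      have hm : min n (200 - (ws.length + 1)) + 1 = min (n + 1) (200 - ws.length) := by omega
      refine Prod.ext ?_ (Prod.ext ?_ ?_)
      · show pvBoardOf _ = pvBoardOf _
        congr 1
        rw [List.append_assoc, ← hm, List.replicate_succ]
        rfl
      · show (((ws.length + 1) + min n (200 - (ws.length + 1)) : Nat) : Int) = _
        congr 1
        omega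
      · show decide (200 < ws.length + 1 + n) = decide (200 < ws.length + (n + 1))
        rw [harith]
    · have h200 : ws.length = 200 := by omega
      have hcond : ((ws.length : Int) ≥ 200) := by exact_mod_cast (by omega : 200 ≤ ws.length)
      rw [pvAltInner, if_pos hcond]
      have hm0 : min (n + 1) (200 - ws.length) = 0 := by omega
      simp [hm0, h200]

theorem pvLoop_eq (chunks : List String) (ws : List Int) (h : ws.length ≤ 200) :
    pvAltLoop chunks (pvBoardOf ws) (ws.length : Int)
    = pvBoardOf (List.take 200 (ws ++ chunks.flatMap pvChunkVals)) := by
  induction chunks generalizing ws with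
  | nil =>
    simp [pvAltLoop, List.take_of_length_le h]
  | cons chunk rest ih =>
    rw [pvAltLoop]
    cases hp : pvParseChunk chunk with
    | none =>
      rw [ih ws h]
      simp [pvChunkVals, hp]
    | some p =>
      obtain ⟨v, c⟩ := p
      dsimp only
      rw [pvInner_eq c.toNat ws v h]
      dsimp only
      have hfl : (chunk :: rest).flatMap pvChunkVals
          = List.replicate c.toNat v ++ rest.flatMap pvChunkVals := by
        simp [pvChunkVals, hp]
      by_cases hs : 200 < ws.length + c.toNat
      · rw [if_pos (by simpa using hs)]
        have hmin : min c.toNat (200 - ws.length) = 200 - ws.length := by omega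
        rw [hmin, hfl]
        congr 1
        have h1 : 200 - (ws ++ List.replicate c.toNat v).length = 0 := by
          simp only [List.length_append, List.length_replicate]; omega
        have h2 : min (200 - ws.length) c.toNat = 200 - ws.length := by omega
        rw [← List.append_assoc, List.take_append, h1, List.take_zero, List.append_nil,
          List.take_append, List.take_of_length_le h, List.take_replicate, h2]
      · rw [if_neg (by simpa using hs)]
        have hmin : min c.toNat (200 - ws.length) = c.toNat := by omega
        rw [hmin,
          show ((ws.length + c.toNat : Nat) : Int) = (((ws ++ List.replicate c.toNat v).length : Nat) : Int) from by simp,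
          ih (ws ++ List.replicate c.toNat v) (by simp only [List.length_append, List.length_replicate]; omega)]
        rw [hfl, List.append_assoc]

theorem pvB_eq (rle : String) (h : rle ≠ "") :
    parse_rle_alt rle = pvBoardOf (List.take 200 (((PySem.Str.split? rle ";").getD []).flatMap pvChunkVals)) := by
  unfold parse_rle_alt
  rw [if_neg h]
  have hb : (List.range 20).map (fun _ => List.replicate 10 (0 : Int)) = pvBoardOf [] := by decide
  rw [hb, show (0 : Int) = ((([] : List Int).length : Nat) : Int) from by simp,
    pvLoop_eq _ [] (by simp), List.nil_append]

-- ===== VERDICT (by name: the statement is the Claim_ definition above) =====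
theorem parse_rle_spec : Claim_equal_parse_rle := by
  intro rle _
  unfold Spec_parse_rle
  by_cases h : rle = ""
  · subst h; decide
  · rw [pvA_eq rle h, pvB_eq rle h]
    exact pvBoardOf_congr _ _ (fun i hi => (pvGetD_take200 _ i hi).symm)
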